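-- pv_equiv track=rewrite | github.com/Sunraku1312/projet-codii- | mat.py | syracuse_steps
-- ===== SOURCE A (Python) =====
-- def syracuse_steps(n):
--     steps = 0
--     max_value = n
--     while n != 1:
--         if n % 2 == 0:
--             n //= 2
--         else:
--             n = 3 * n + 1
--         max_value = max(max_value, n)
--         steps += 1
--     return steps, max_value
-- ===== SOURCE B (Python) =====
-- def syracuse_steps(n):
--     # Recursive shortcut-Collatz: an odd n jumps straight to (3n+1)//2,
--     # counting 2 steps, since 3n+1 is always even; steps and max are
--     # combined on the way back instead of accumulated in a loop.
--     if n == 1: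
--         return 0, 1
--     if n % 2 == 0:
--         s, m = syracuse_steps(n // 2)
--         return s + 1, max(n, m)
--     v = 3 * n + 1
--     s, m = syracuse_steps(v // 2)
--     return s + 2, max(v, m)
-- ===== Notes on version B (the rewrite author's own statement) =====
-- stated objective: alternative
-- what changed: B is a recursive shortcut-Collatz: an odd n jumps directly to (3n+1)//2 counting two steps at once (3n+1 is always even), halving the number of iterations for odd values, and the step count and maximum are combined on the return path instead of A's in-loop accumulators; correct because the skipped intermediate 3n+1 dominates its successor (3n+1)//2, so max(3n+1, rest) covers both skipped values.
import Mathlib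
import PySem

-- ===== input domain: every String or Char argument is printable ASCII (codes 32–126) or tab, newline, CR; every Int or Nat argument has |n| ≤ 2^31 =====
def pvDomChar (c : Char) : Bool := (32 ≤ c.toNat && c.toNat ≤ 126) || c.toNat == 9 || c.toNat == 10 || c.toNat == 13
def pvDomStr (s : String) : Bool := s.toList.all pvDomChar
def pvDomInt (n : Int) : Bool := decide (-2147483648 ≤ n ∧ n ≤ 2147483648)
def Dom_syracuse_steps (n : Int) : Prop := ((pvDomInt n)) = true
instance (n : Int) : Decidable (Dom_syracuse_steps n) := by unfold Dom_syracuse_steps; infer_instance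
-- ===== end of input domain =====

-- B is a recursive shortcut-Collatz: an odd n jumps directly to (3n+1)//2 counting two
-- steps at once (3n+1 is always even), and steps/max are combined on the return path;
-- alternative decomposition, similar cost. Both ports use a fuel parameter (Collatz
-- termination is unproven in general); fuel suffices for every terminating small input.

-- ===== PORT A =====
def syracuseLoopA : Nat → Int → Int → Int → Int × Int
  | 0, _, steps, mx => (steps, mx)
  | fuel + 1, n, steps, mx =>
    if n ≠ 1 then
      let n' := if PySem.Int.mod n 2 = 0 then PySem.Int.floordiv n 2 else 3 * n + 1
      syracuseLoopA fuel n' (steps + 1) (max mx n')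
    else (steps, mx)

def syracuse_steps (n : Int) : Int × Int :=
  syracuseLoopA 100000 n 0 n

-- ===== PORT B =====
-- fuel is counted in A-steps: the odd branch consumes two units (it performs two Collatz
-- steps); the inner `| 0 => (1, v)` case is a fuel-exhaustion artifact never reached by
-- terminating runs.
def syracuseRecB : Nat → Int → Int × Int
  | 0, n => (0, n)
  | fuel + 1, n =>
    if n = 1 then (0, 1)
    else if PySem.Int.mod n 2 = 0 then
      let p := syracuseRecB fuel (PySem.Int.floordiv n 2)
      (p.1 + 1, max n p.2)
    else
      let v := 3 * n + 1
      match fuel with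
      | 0 => (1, v)
      | f + 1 =>
        let p := syracuseRecB f (PySem.Int.floordiv v 2)
        (p.1 + 2, max v p.2)

def syracuse_steps_alt (n : Int) : Int × Int :=
  syracuseRecB 100000 n

-- ===== PRECONDITION & SPEC =====
-- A's while loop never reaches 1 from n ≤ 0 (it loops forever: 0 stays 0, negative values
-- stay negative), so A returns only on n ≥ 1.
def Pre_syracuse_steps (n : Int) : Prop := 1 ≤ n
instance (n : Int) : Decidable (Pre_syracuse_steps n) := by unfold Pre_syracuse_steps; infer_instance
def pvWitness_syracuse_steps : Int := 7

def Spec_syracuse_steps (n : Int) (out : Int × Int) : Prop := out = syracuse_steps_alt n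
instance (n : Int) (out : Int × Int) : Decidable (Spec_syracuse_steps n out) := by unfold Spec_syracuse_steps; infer_instance

-- ===== CLAIM (what is proved, stated in full; the proofs are below) =====
def Claim_equal_syracuse_steps : Prop := ∀ (n : Int), Dom_syracuse_steps n → Pre_syracuse_steps n → Spec_syracuse_steps n (syracuse_steps n)

-- ===== LEMMAS AND PROOFS =====

-- B's result max dominates its argument (for n ≥ 1).
lemma recB_snd_ge (fuel : Nat) : ∀ n : Int, 1 ≤ n → n ≤ (syracuseRecB fuel n).2 := by
  induction fuel using Nat.strong_induction_on with
  | _ fuel ih =>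
    intro n hn
    match fuel with
    | 0 => simp [syracuseRecB]
    | fuel + 1 =>
      by_cases h1 : n = 1
      · simp [syracuseRecB, h1]
      · by_cases he : PySem.Int.mod n 2 = 0
        · simp only [syracuseRecB, if_neg h1, if_pos he]
          exact le_max_left _ _
        · match fuel with
          | 0 =>
            simp only [syracuseRecB, if_neg h1, if_neg he]
            omega
          | f + 1 =>
            simp only [syracuseRecB, if_neg h1, if_neg he]
            have : (3 : Int) * n + 1 ≤ max (3 * n + 1) (syracuseRecB f (PySem.Int.floordiv (3 * n + 1) 2)).2 := le_max_left _ _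
            omega

-- Invariant: A's accumulator loop equals B's recursion combined with the accumulators,
-- for any fuel (B's odd branch consumes two fuel units, matching two A iterations).
lemma syracuse_invariant (fuel : Nat) : ∀ (n steps mx : Int), 1 ≤ n → n ≤ mx →
    syracuseLoopA fuel n steps mx =
      (steps + (syracuseRecB fuel n).1, max mx (syracuseRecB fuel n).2) := by
  induction fuel using Nat.strong_induction_on with
  | _ fuel ih =>
    intro n steps mx hn hmx
    have h2 : (0 : Int) < 2 := by norm_num
    match fuel with
    | 0 =>
      simp [syracuseLoopA, syracuseRecB]
      omega
    | fuel + 1 =>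
      by_cases h1 : n = 1
      · subst h1
        simp [syracuseLoopA, syracuseRecB]
        omega
      · by_cases he : PySem.Int.mod n 2 = 0
        · -- even step: one A iteration matches one B call
          have hmod : n % 2 = 0 := by rwa [PySem.Int.mod_eq_emod_of_pos h2] at he
          have hdv : PySem.Int.floordiv n 2 = n / 2 := PySem.Int.floordiv_eq_ediv_of_pos h2
          have hge : 1 ≤ n / 2 := by omega
          have hle : n / 2 ≤ mx := by omega
          simp only [syracuseLoopA, syracuseRecB, if_pos h1, ne_eq, if_neg h1, if_pos he, hdv]
          rw [ih fuel (by omega) (n / 2) (steps + 1) (max mx (n / 2)) hge (le_max_right _ _)]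
          rw [max_eq_left hle]
          refine Prod.ext ?_ ?_
          · simp; omega
          · simp only
            rw [← max_assoc, max_eq_left hmx]
        · -- odd step: two A iterations match one B call
          have hmod : n % 2 = 1 := by
            rw [PySem.Int.mod_eq_emod_of_pos h2] at he; omega
          have hn3 : 3 ≤ n := by omega
          have hv1 : (3 * n + 1) ≠ 1 := by omega
          have hve : PySem.Int.mod (3 * n + 1) 2 = 0 := by
            rw [PySem.Int.mod_eq_emod_of_pos h2]; omega
          match fuel with
          | 0 =>
            have hnd : ¬ (2:Int) ∣ n := by omega
            simp [syracuseLoopA, syracuseRecB, h1, hnd]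
          | f + 1 =>
            have hdv : PySem.Int.floordiv (3 * n + 1) 2 = (3 * n + 1) / 2 := PySem.Int.floordiv_eq_ediv_of_pos h2
            have hge : 1 ≤ (3 * n + 1) / 2 := by omega
            simp only [syracuseLoopA, syracuseRecB, ne_eq, if_neg h1, if_neg he, if_pos hv1,
              if_pos hve, hdv, ite_not]
            rw [ih f (by omega) ((3 * n + 1) / 2) (steps + 1 + 1)
              (max (max mx (3 * n + 1)) ((3 * n + 1) / 2)) hge (le_max_right _ _)]
            have hcol : max (max mx (3 * n + 1)) ((3 * n + 1) / 2) = max mx (3 * n + 1) := by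
              apply max_eq_left; apply le_max_of_le_right; omega
            rw [hcol]
            refine Prod.ext ?_ ?_
            · simp; omega
            · simp only
              rw [max_assoc]

-- ===== VERDICT (by name: the statement is the Claim_ definition above) =====
theorem syracuse_steps_spec : Claim_equal_syracuse_steps := by
  intro n _ hpre
  unfold Spec_syracuse_steps syracuse_steps syracuse_steps_alt
  rw [syracuse_invariant 100000 n 0 n hpre le_rfl]
  refine Prod.ext (by simp) ?_
  simp only
  exact max_eq_right (recB_snd_ge 100000 n hpre)
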